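-- pv_equiv track=rewrite | github.com/sougatoroy3/earthy | earthlings/sumOrProduct.py | sumOrProduct
-- ===== SOURCE A (Python) =====
-- def sumOrProduct(n, q):
--     sum=0
--     prod=1
--     for i in range(1, n+1):
--             sum+=i
--             prod=prod*i
--     if q==1:
--         return sum
--     elif q==2:
--         return prod
-- ===== SOURCE B (Python) =====
-- def sumOrProduct(n, q):
--     if q == 1:
--         return n * (n + 1) // 2 if n > 0 else 0
--     if q == 2:
--         prod = 1
--         for i in range(2, n + 1):
--             prod *= i
--         return prod
--     return None
-- ===== Notes on version B (the rewrite author's own statement) =====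
-- stated objective: faster
-- what changed: B computes only the requested branch: the q=1 sum by the closed form n*(n+1)//2 instead of a loop, and the q=2 factorial by a loop starting at 2, instead of A's single loop that always computes both sum and product.
import Mathlib
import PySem

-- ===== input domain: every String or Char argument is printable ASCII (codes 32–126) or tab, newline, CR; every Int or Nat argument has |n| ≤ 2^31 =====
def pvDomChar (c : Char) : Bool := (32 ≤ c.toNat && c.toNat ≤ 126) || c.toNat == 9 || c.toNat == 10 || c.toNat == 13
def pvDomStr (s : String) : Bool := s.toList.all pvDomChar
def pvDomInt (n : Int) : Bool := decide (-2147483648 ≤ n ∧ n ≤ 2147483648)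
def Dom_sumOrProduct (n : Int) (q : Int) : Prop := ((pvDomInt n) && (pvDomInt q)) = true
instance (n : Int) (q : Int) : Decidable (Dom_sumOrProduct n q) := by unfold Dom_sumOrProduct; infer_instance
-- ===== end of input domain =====

-- B computes only the requested branch: closed form n*(n+1)//2 for q=1, a factorial loop from 2 for q=2 (faster for q=1).

-- ===== PORT A =====
def sumOrProduct (n : Int) (q : Int) : Option Int :=
  let sp : Int × Int :=
    (PySem.List.pyRange 1 (n + 1) 1).foldl (fun s i => (s.1 + i, s.2 * i)) (0, 1)
  if q = 1 then some sp.1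
  else if q = 2 then some sp.2
  else none

-- ===== PORT B =====
def sumOrProduct_alt (n : Int) (q : Int) : Option Int :=
  if q = 1 then some (if n > 0 then PySem.Int.floordiv (n * (n + 1)) 2 else 0)
  else if q = 2 then
    some ((PySem.List.pyRange 2 (n + 1) 1).foldl (fun p i => p * i) 1)
  else none

-- ===== PRECONDITION & SPEC =====
def Spec_sumOrProduct (n : Int) (q : Int) (out : Option Int) : Prop := out = sumOrProduct_alt n q
instance (n : Int) (q : Int) (out : Option Int) : Decidable (Spec_sumOrProduct n q out) := by unfold Spec_sumOrProduct; infer_instance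

-- ===== CLAIM (what is proved, stated in full; the proofs are below) =====
def Claim_equal_sumOrProduct : Prop := ∀ (n : Int) (q : Int), Dom_sumOrProduct n q → Spec_sumOrProduct n q (sumOrProduct n q)

-- ===== LEMMAS AND PROOFS =====

-- twice the loop sum of 1..m is m*(m+1)
theorem pv_twice_sum (m : Nat) :
    2 * (PySem.List.pyRange 1 ((m : Int) + 1) 1).foldl (fun s i => s + i) 0 = (m : Int) * (m + 1) := by
  induction m with
  | zero =>
    rw [show ((0:Nat):Int) + 1 = 1 by norm_num, PySem.List.pyRange_one_eq_nil (by omega)]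
    simp
  | succ k ih =>
    have h : ((k + 1 : Nat) : Int) + 1 = ((k : Int) + 1) + 1 := by push_cast; ring
    rw [h, PySem.List.pyRange_one_succ_right (by omega : (1:Int) ≤ (k : Int) + 1),
        List.foldl_append]
    simp only [List.foldl_cons, List.foldl_nil]
    push_cast
    nlinarith [ih]

-- the product loop from 1 equals the product loop from 2
theorem pv_prod_shift (b : Int) :
    (PySem.List.pyRange 1 b 1).foldl (fun p i => p * i) 1
      = (PySem.List.pyRange 2 b 1).foldl (fun p i => p * i) 1 := by
  by_cases h : 1 < b
  · rw [PySem.List.pyRange_one_cons h]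
    simp
  · rw [PySem.List.pyRange_one_eq_nil (by omega), PySem.List.pyRange_one_eq_nil (by omega)]

-- ===== VERDICT (by name: the statement is the Claim_ definition above) =====
theorem sumOrProduct_spec : Claim_equal_sumOrProduct := by
  intro n q _
  unfold Spec_sumOrProduct sumOrProduct sumOrProduct_alt
  rw [PySem.List.foldl_prod_mk]
  by_cases hq1 : q = 1
  · simp only [hq1, reduceIte]
    by_cases hn : n > 0
    · rw [if_pos hn]
      obtain ⟨m, rfl⟩ : ∃ m : Nat, n = (m : Int) := ⟨n.toNat, by omega⟩
      have hs := pv_twice_sum m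
      rw [PySem.Int.floordiv_eq_ediv_of_pos (by omega : (0:Int) < 2)]
      congr 1
      have hs' : 2 * List.foldl HAdd.hAdd (0:Int) (PySem.List.pyRange 1 ((m:Int)+1) 1)
          = (m : Int) * ((m : Int) + 1) := hs
      generalize (m : Int) * ((m : Int) + 1) = X at hs' ⊢
      omega
    · rw [if_neg hn]
      rw [PySem.List.pyRange_one_eq_nil (by omega : n + 1 ≤ 1)]
      rfl
  · by_cases hq2 : q = 2
    · subst hq2
      norm_num [pv_prod_shift]
    · simp [hq1, hq2]
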